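-- pv_equiv track=rewrite | github.com/glitch-cc/infra-hunter | sources/zoomeye.py | translate_shodan_query
-- ===== SOURCE A (Python) =====
-- def translate_shodan_query(shodan_query: str) -> str:
--     """
--     Translate a Shodan query to ZoomEye syntax.
--
--     Basic translations - not comprehensive.
--     """
--     # Direct mappings
--     translations = {
--         'ssl.jarm:': 'ssl.jarm:',
--         'ssl.cert.subject.cn:': 'ssl.cert.subject.cn:',
--         'ssl.cert.issuer.cn:': 'ssl.cert.issuer.cn:',
--         'ssl.cert.fingerprint:': 'ssl.cert.fingerprint:',
--         'http.title:': 'title:',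
--         'http.html:': 'body:',
--         'port:': 'port:',
--         'country:': 'country:',
--         'org:': 'org:',
--         'asn:': 'asn:',
--     }
--
--     result = shodan_query
--     for shodan_key, zoomeye_key in translations.items():
--         result = result.replace(shodan_key, zoomeye_key)
--
--     return result
-- ===== SOURCE B (Python) =====
-- def translate_shodan_query(shodan_query: str) -> str:
--     """
--     Translate a Shodan query to ZoomEye syntax.
--
--     Every keyword ends with ':' and contains no other ':', so a keyword
--     occurrence is exactly a ':'-terminated chunk whose tail is the keyword.
--     Split the query once after each ':' and rewrite each chunk's suffix.
--     """
--     translations = {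
--         'ssl.jarm:': 'ssl.jarm:',
--         'ssl.cert.subject.cn:': 'ssl.cert.subject.cn:',
--         'ssl.cert.issuer.cn:': 'ssl.cert.issuer.cn:',
--         'ssl.cert.fingerprint:': 'ssl.cert.fingerprint:',
--         'http.title:': 'title:',
--         'http.html:': 'body:',
--         'port:': 'port:',
--         'country:': 'country:',
--         'org:': 'org:',
--         'asn:': 'asn:',
--     }
--
--     # split the query once, keeping the ':' at the end of each chunk
--     parts = []
--     cur = []
--     for ch in shodan_query:
--         cur.append(ch)
--         if ch == ':':
--             parts.append(''.join(cur))
--             cur = []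
--     parts.append(''.join(cur))
--
--     out = []
--     for part in parts:
--         for shodan_key, zoomeye_key in translations.items():
--             if part.endswith(shodan_key):
--                 part = part[:len(part) - len(shodan_key)] + zoomeye_key
--                 break
--         out.append(part)
--     return ''.join(out)
-- ===== Notes on version B (the rewrite author's own statement) =====
-- stated objective: alternative
-- what changed: Instead of ten sequential full-string .replace passes over the query, B splits the query once after each colon character (every keyword ends in a colon and contains no other colon, so a keyword occurrence is exactly the tail of one chunk) and rewrites each chunk's suffix by a single dictionary scan.
import Mathlib
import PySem

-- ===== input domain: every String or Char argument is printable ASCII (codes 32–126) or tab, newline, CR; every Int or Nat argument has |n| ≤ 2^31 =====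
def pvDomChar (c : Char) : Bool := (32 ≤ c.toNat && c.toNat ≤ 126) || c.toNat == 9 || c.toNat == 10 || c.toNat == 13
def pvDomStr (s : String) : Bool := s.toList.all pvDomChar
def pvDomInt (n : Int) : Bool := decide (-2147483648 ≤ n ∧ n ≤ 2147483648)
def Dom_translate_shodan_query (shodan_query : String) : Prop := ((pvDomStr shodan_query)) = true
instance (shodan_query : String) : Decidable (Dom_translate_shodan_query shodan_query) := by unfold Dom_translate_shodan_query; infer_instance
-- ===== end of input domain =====

-- B replaces A's ten sequential full-string replace passes by one split of the
-- query after each ':' plus a per-chunk suffix rewrite (objective: alternative).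


-- ===== PORT A =====
-- the dict literal `translations` (insertion order)
def pvTranslationsA : List (String × String) :=
  [("ssl.jarm:", "ssl.jarm:"),
   ("ssl.cert.subject.cn:", "ssl.cert.subject.cn:"),
   ("ssl.cert.issuer.cn:", "ssl.cert.issuer.cn:"),
   ("ssl.cert.fingerprint:", "ssl.cert.fingerprint:"),
   ("http.title:", "title:"),
   ("http.html:", "body:"),
   ("port:", "port:"),
   ("country:", "country:"),
   ("org:", "org:"),
   ("asn:", "asn:")]

-- for shodan_key, zoomeye_key in translations.items(): result = result.replace(...)
def translate_shodan_query (shodan_query : String) : String :=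
  pvTranslationsA.foldl (fun result kv => PySem.Str.replace result kv.1 kv.2) shodan_query

-- ===== PORT B =====
-- Source B's dict literal, at code-point level
def pvTranslationsB : List (List Char × List Char) :=
  [("ssl.jarm:".toList, "ssl.jarm:".toList),
   ("ssl.cert.subject.cn:".toList, "ssl.cert.subject.cn:".toList),
   ("ssl.cert.issuer.cn:".toList, "ssl.cert.issuer.cn:".toList),
   ("ssl.cert.fingerprint:".toList, "ssl.cert.fingerprint:".toList),
   ("http.title:".toList, "title:".toList),
   ("http.html:".toList, "body:".toList),
   ("port:".toList, "port:".toList),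
   ("country:".toList, "country:".toList),
   ("org:".toList, "org:".toList),
   ("asn:".toList, "asn:".toList)]

-- the splitting loop: `for ch in shodan_query: cur.append(ch); if ch == ':': ...`
-- (Source B's ''.join(cur) just materialises the chunk; chunks are kept as char lists)
def pvTokB : List Char → List Char → List (List Char)
  | [], cur => [cur]
  | c :: rest, cur =>
      if c = ':' then (cur ++ [c]) :: pvTokB rest []
      else pvTokB rest (cur ++ [c])

-- the inner `for shodan_key, zoomeye_key in translations.items(): if part.endswith...: break`
def pvFirstRepl : List (List Char × List Char) → List Char → List Char
  | [], part => part
  | kv :: rest, part =>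
      if PySem.Chars.endswith part kv.1 then
        PySem.List.slice part none (some ((part.length : Int) - (kv.1.length : Int))) ++ kv.2
      else pvFirstRepl rest part

-- ''.join(out) with out = [processed part for part in parts]
def translate_shodan_query_alt (shodan_query : String) : String :=
  String.ofList (((pvTokB shodan_query.toList []).map (pvFirstRepl pvTranslationsB)).flatten)

-- ===== PRECONDITION & SPEC =====
def Spec_translate_shodan_query (shodan_query : String) (out : String) : Prop := out = translate_shodan_query_alt shodan_query
instance (shodan_query : String) (out : String) : Decidable (Spec_translate_shodan_query shodan_query out) := by unfold Spec_translate_shodan_query; infer_instance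

-- ===== CLAIM (what is proved, stated in full; the proofs are below) =====
def Claim_equal_translate_shodan_query : Prop := ∀ (shodan_query : String), Dom_translate_shodan_query shodan_query → Spec_translate_shodan_query shodan_query (translate_shodan_query shodan_query)

-- ===== LEMMAS AND PROOFS =====

def pvRepl (o : Char) (os new : List Char) : List Char → List Char
  | [] => []
  | c :: t =>
      if (o :: os).isPrefixOf (c :: t) then new ++ pvRepl o os new (t.drop os.length)
      else c :: pvRepl o os new t
  termination_by l => l.length
  decreasing_by
    · simp
    · simp

theorem pvRepl_go (o : Char) (os new : List Char) :
    ∀ (fuel : Nat) (l acc : List Char), l.length ≤ fuel →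
      PySem.Chars.replace.go (o :: os) new fuel l acc = acc.reverse ++ pvRepl o os new l := by
  intro fuel
  induction fuel with
  | zero =>
    intro l acc h
    have : l = [] := List.length_eq_zero_iff.mp (Nat.le_zero.mp h)
    subst this
    simp [PySem.Chars.replace.go, pvRepl]
  | succ n ih =>
    intro l acc h
    match l with
    | [] => simp [PySem.Chars.replace.go, pvRepl]
    | c :: t =>
      rw [pvRepl]
      by_cases hp : (o :: os).isPrefixOf (c :: t)
      · simp only [PySem.Chars.replace.go, hp, if_true]
        rw [ih _ _ (by simp at h ⊢; omega)]
        simp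
      · simp only [PySem.Chars.replace.go, hp]
        rw [ih t (c :: acc) (by simpa using h)]
        simp

theorem pvReplace_eq (o : Char) (os new s : List Char) :
    PySem.Chars.replace s (o :: os) new = pvRepl o os new s := by
  rw [PySem.Chars.replace]
  simp only [List.isEmpty_cons, if_false, Bool.false_eq_true]
  simpa using pvRepl_go o os new s.length s [] (le_refl _)

def pvGood (x : List Char) : Prop := ':' ∉ x.dropLast ∧ x.getLast? = some ':' ∧ 2 ≤ x.length

theorem pvGood_not_prefix_CF {k w : List Char} (hc : ':' ∈ k) (hw : ':' ∉ w) :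
    ¬ k <+: w := fun hs => hw (hs.subset hc)

theorem pvGood_mem_colon {x : List Char} (h : pvGood x) : ':' ∈ x :=
  List.mem_of_getLast? h.2.1

theorem pvRepl_CF {o : Char} {os : List Char} (new : List Char) (hk : pvGood (o :: os)) :
    ∀ {w : List Char}, ':' ∉ w → pvRepl o os new w = w := by
  intro w
  induction w with
  | nil => intro _; rw [pvRepl]
  | cons c t ih =>
    intro hw
    rw [pvRepl]
    have hp : ¬ (o :: os).isPrefixOf (c :: t) = true := by
      rw [List.isPrefixOf_iff_prefix]
      exact pvGood_not_prefix_CF (pvGood_mem_colon hk) hw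
    rw [if_neg hp, ih (fun h => hw (List.mem_cons_of_mem c h))]

theorem pvGood_eq_concat {x : List Char} (h : pvGood x) : x = x.dropLast ++ [':'] := by
  have hx : x ≠ [] := by rintro rfl; simp [pvGood] at h
  have h2 := List.dropLast_concat_getLast hx
  have h3 : x.getLast hx = ':' := by
    have := h.2.1
    rw [List.getLast?_eq_some_getLast hx] at this
    simpa using this
  rw [h3] at h2
  exact h2.symm

theorem pvPrefix_token {u k₀ rest : List Char} (hu : ':' ∉ u) (hk : ':' ∉ k₀)
    (h : (k₀ ++ [':']) <+: (u ++ ':' :: rest)) : k₀ = u := by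
  obtain ⟨t, ht⟩ := h
  rcases Nat.lt_trichotomy k₀.length u.length with hl | hl | hl
  · exfalso
    have h1 : (u ++ ':' :: rest)[k₀.length]? = u[k₀.length]? := by
      rw [List.getElem?_append_left (by omega)]
    have h2 : ((k₀ ++ [':']) ++ t)[k₀.length]? = some ':' := by
      rw [List.getElem?_append_left (by simp), List.getElem?_append_right (by omega)]
      simp
    rw [ht, h1] at h2
    exact hu (List.mem_of_getElem? h2)
  · have heq : k₀ ++ [':'] = u ++ [':'] := by
      have h5 : u ++ ':' :: rest = (u ++ [':']) ++ rest := by simp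
      rw [h5] at ht
      exact List.append_inj_left ht (by simp [hl])
    simpa using heq
  · exfalso
    have h1 : (u ++ ':' :: rest)[u.length]? = some ':' := by
      rw [List.getElem?_append_right (by omega)]; simp
    have h2 : ((k₀ ++ [':']) ++ t)[u.length]? = k₀[u.length]? := by
      rw [List.getElem?_append_left (by simp; omega), List.getElem?_append_left (by omega)]
    rw [ht, h1] at h2
    exact hk (List.mem_of_getElem? h2.symm)

def pvTokRepl (k v T : List Char) : List Char :=
  if k.isSuffixOf T then T.take (T.length - k.length) ++ v else T

theorem pvRepl_token {o : Char} {os : List Char} (new : List Char) (hk : pvGood (o :: os)) :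
    ∀ (u : List Char) (rest : List Char), ':' ∉ u →
    pvRepl o os new (u ++ ':' :: rest)
      = pvTokRepl (o :: os) new (u ++ [':']) ++ pvRepl o os new rest := by
  have hos : os ≠ [] := by
    have := hk.2.2; intro h; subst h; simp at this
  have hkc : (o :: os) = (o :: os).dropLast ++ [':'] := pvGood_eq_concat hk
  have hkcf : ':' ∉ (o :: os).dropLast := hk.1
  intro u
  induction u with
  | nil =>
    intro rest _
    rw [List.nil_append, pvRepl]
    have hp : ¬ (o :: os).isPrefixOf (':' :: rest) = true := by
      rw [List.isPrefixOf_iff_prefix]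
      intro hpre
      have ho : o = ':' := by
        obtain ⟨t, ht⟩ := hpre
        have := congrArg (·[0]?) ht.symm
        simp at this
        exact this.symm
      have : o ∈ (o :: os).dropLast := by
        simp [List.dropLast_cons_of_ne_nil hos]
      exact hkcf (ho ▸ this)
    rw [if_neg hp]
    have hs : ¬ (o :: os).isSuffixOf [':'] = true := by
      rw [List.isSuffixOf_iff_suffix]
      intro hsuf
      have h1 := hsuf.length_le
      have h2 := hk.2.2
      simp only [List.length_cons, List.length_nil] at h1 h2
      omega
    simp [pvTokRepl, hs]
  | cons c u' ih =>
    intro rest hu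
    have hu' : ':' ∉ u' := fun h => hu (List.mem_cons_of_mem c h)
    have hc : c ≠ ':' := fun h => hu (h ▸ List.mem_cons_self)
    rw [List.cons_append, pvRepl]
    by_cases hp : (o :: os).isPrefixOf (c :: (u' ++ ':' :: rest)) = true
    · -- full-tail match: o :: os = (c :: u') ++ [':']
      rw [List.isPrefixOf_iff_prefix] at hp
      have hkey : (o :: os).dropLast = c :: u' := by
        apply pvPrefix_token (u := c :: u') (rest := rest) (by simp; exact ⟨fun h => hc h.symm, hu'⟩) hkcf
        rw [← hkc]
        simpa using hp
      have hklen : (o :: os).length = u'.length + 2 := by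
        have := congrArg List.length hkc
        simp [hkey] at this
        simpa using this
      rw [if_pos (by rw [List.isPrefixOf_iff_prefix]; exact hp)]
      have hdrop : (u' ++ ':' :: rest).drop os.length = rest := by
        have hoslen : os.length = u'.length + 1 := by simp at hklen; omega
        rw [hoslen]
        rw [show u' ++ ':' :: rest = (u' ++ [':']) ++ rest by simp]
        rw [List.drop_append_of_le_length (by simp)]
        simp
      have hsuf : (o :: os).isSuffixOf ((c :: u') ++ [':']) = true := by
        rw [List.isSuffixOf_iff_suffix]
        rw [hkc, hkey]
      rw [hdrop]
      simp only [pvTokRepl, hsuf, if_true]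
      have : ((c :: u') ++ [':']).length - (o :: os).length = 0 := by
        simp [hklen]
      rw [this]
      simp
    · rw [if_neg hp, ih rest hu']
      have hT : pvTokRepl (o :: os) new ((c :: u') ++ [':'])
          = c :: pvTokRepl (o :: os) new (u' ++ [':']) := by
        by_cases hs : (o :: os).isSuffixOf (u' ++ [':']) = true
        · have hs' : (o :: os).isSuffixOf ((c :: u') ++ [':']) = true := by
            rw [List.isSuffixOf_iff_suffix] at hs ⊢
            exact hs.trans (by simp)
          have hlen : (o :: os).length ≤ u'.length + 1 := by
            rw [List.isSuffixOf_iff_suffix] at hs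
            simpa using hs.length_le
          simp only [pvTokRepl, hs, hs', if_true]
          have h1 : ((c :: u') ++ [':']).length - (o :: os).length
              = ((u' ++ [':']).length - (o :: os).length) + 1 := by
            simp at hlen ⊢; omega
          rw [h1, List.cons_append, List.take_succ_cons, List.cons_append]
        · have hs' : ¬ (o :: os).isSuffixOf ((c :: u') ++ [':']) = true := by
            rw [List.isSuffixOf_iff_suffix] at hs ⊢
            rw [List.cons_append, List.suffix_cons_iff]
            rintro (heq | hsuf)
            · apply hp
              rw [List.isPrefixOf_iff_prefix, heq]
              exact ⟨rest, by simp⟩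
            · exact hs hsuf
          have e1 : pvTokRepl (o :: os) new ((c :: u') ++ [':']) = (c :: u') ++ [':'] := by
            rw [pvTokRepl, if_neg]; exact hs'
          have e2 : pvTokRepl (o :: os) new (u' ++ [':']) = u' ++ [':'] := by
            rw [pvTokRepl, if_neg]; exact hs
          rw [e1, e2, List.cons_append]
      rw [hT, List.cons_append]

def pvProper (T : List Char) : Prop := ':' ∉ T.dropLast ∧ T.getLast? = some ':'

def pvTokOK : List (List Char) → Prop
  | [] => True
  | [t] => ':' ∉ t
  | t :: ts => pvProper t ∧ pvTokOK ts

theorem pvProper_eq_concat {T : List Char} (h : pvProper T) : T = T.dropLast ++ [':'] := by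
  have hx : T ≠ [] := by rintro rfl; simp [pvProper] at h
  have h2 := List.dropLast_concat_getLast hx
  have h3 : T.getLast hx = ':' := by
    have := h.2
    rw [List.getLast?_eq_some_getLast hx] at this
    simpa using this
  rw [h3] at h2
  exact h2.symm

theorem pvRepl_flatten {o : Char} {os : List Char} (new : List Char) (hk : pvGood (o :: os)) :
    ∀ Ts : List (List Char), pvTokOK Ts →
      pvRepl o os new Ts.flatten = (Ts.map (pvTokRepl (o :: os) new)).flatten := by
  intro Ts
  induction Ts with
  | nil => intro _; simp [pvRepl]
  | cons T Ts ih =>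
    intro hok
    match Ts, hok with
    | [], hok =>
      have hcf : ':' ∉ T := hok
      have hns : ¬ (o :: os).isSuffixOf T = true := by
        rw [List.isSuffixOf_iff_suffix]
        exact fun hs => hcf (hs.subset (pvGood_mem_colon hk))
      simp [pvRepl_CF new hk hcf, pvTokRepl, hns]
    | T' :: Ts', hok =>
      obtain ⟨hprop, hok'⟩ := hok
      have hTeq := pvProper_eq_concat hprop
      have hflat : (T :: T' :: Ts').flatten = T.dropLast ++ ':' :: (T' :: Ts').flatten := by
        conv_lhs => rw [List.flatten_cons, hTeq]
        simp
      rw [hflat, pvRepl_token new hk _ _ hprop.1, ih hok']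
      rw [List.map_cons, List.flatten_cons, ← hTeq]
      simp

theorem pvTokRepl_proper {k v T : List Char} (hk : pvGood k) (hv : pvGood v)
    (hT : pvProper T) : pvProper (pvTokRepl k v T) := by
  rw [pvTokRepl]
  by_cases hs : k.isSuffixOf T = true
  · rw [if_pos hs]
    have hvne : v ≠ [] := by rintro rfl; simp [pvGood] at hv
    constructor
    · rw [List.dropLast_append_of_ne_nil hvne]
      intro hmem
      rcases List.mem_append.mp hmem with h | h
      · -- in the taken part of T, which lies inside T.dropLast
        have hkne : k ≠ [] := by rintro rfl; simp [pvGood] at hk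
        have hlen : T.length - k.length ≤ T.dropLast.length := by
          rw [List.isSuffixOf_iff_suffix] at hs
          have := hs.length_le
          have : 1 ≤ k.length := by have := hk.2.2; omega
          simp [List.length_dropLast]
          omega
        have : List.take (T.length - k.length) T = List.take (T.length - k.length) T.dropLast := by
          rw [List.dropLast_eq_take, List.take_take]
          congr 1
          simp at hlen
          omega
        rw [this] at h
        exact hT.1 (List.take_subset _ _ h)
      · exact hv.1 h
    · rw [List.getLast?_append_of_ne_nil _ hvne]
      exact hv.2.1
  · rw [if_neg hs]; exact hT

theorem pvTokOK_map {k v : List Char} (hk : pvGood k) (hv : pvGood v) :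
    ∀ Ts : List (List Char), pvTokOK Ts → pvTokOK (Ts.map (pvTokRepl k v)) := by
  intro Ts
  induction Ts with
  | nil => intro _; trivial
  | cons T Ts ih =>
    intro hok
    match Ts, hok with
    | [], hok =>
      have hcf : ':' ∉ T := hok
      have hns : ¬ k.isSuffixOf T = true := by
        rw [List.isSuffixOf_iff_suffix]
        exact fun hs => hcf (hs.subset (pvGood_mem_colon hk))
      show pvTokOK [pvTokRepl k v T]
      rw [pvTokRepl, if_neg hns]
      exact hcf
    | T' :: Ts', hok =>
      obtain ⟨hprop, hok'⟩ := hok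
      exact ⟨pvTokRepl_proper hk hv hprop, ih hok'⟩

theorem pvChain_flatten :
    ∀ (pairs : List (List Char × List Char)), (∀ p ∈ pairs, pvGood p.1 ∧ pvGood p.2) →
      ∀ Ts : List (List Char), pvTokOK Ts →
        pairs.foldl (fun r kv => PySem.Chars.replace r kv.1 kv.2) Ts.flatten
          = (Ts.map (fun T => pairs.foldl (fun T kv => pvTokRepl kv.1 kv.2 T) T)).flatten := by
  intro pairs
  induction pairs with
  | nil => intro _ Ts _; simp
  | cons p pairs ih =>
    intro hg Ts hok
    obtain ⟨hk, hv⟩ := hg p (by simp)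
    obtain ⟨o, os, hko⟩ : ∃ o os, p.1 = o :: os := by
      match p, hk with
      | (k :: ks, v), _ => exact ⟨k, ks, rfl⟩
      | ([], v), hk => simp [pvGood] at hk
    simp only [List.foldl_cons]
    rw [hko, pvReplace_eq, pvRepl_flatten p.2 (hko ▸ hk) Ts hok, ← hko]
    rw [ih (fun q hq => hg q (by simp [hq])) _ (pvTokOK_map hk hv Ts hok)]
    rw [List.map_map]
    rfl

def pvR (p q : List Char × List Char) : Prop :=
  ¬ p.1 <:+ q.1 ∧ ¬ q.1 <:+ p.1 ∧ ¬ q.1 <:+ p.2 ∧ ¬ p.2 <:+ q.1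

theorem pvSuffix_append_cases {k' x v : List Char} (h : k' <:+ x ++ v) :
    k' <:+ v ∨ v <:+ k' := by
  rcases Nat.le_total k'.length v.length with hl | hl
  · exact Or.inl (List.suffix_of_suffix_length_le h (List.suffix_append x v) hl)
  · exact Or.inr (List.suffix_of_suffix_length_le (List.suffix_append x v) h hl)

theorem pvFold_noop : ∀ (Q : List (List Char × List Char)) (T : List Char),
    (∀ p ∈ Q, ¬ p.1 <:+ T) →
    Q.foldl (fun T kv => pvTokRepl kv.1 kv.2 T) T = T := by
  intro Q
  induction Q with
  | nil => intro T _; rfl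
  | cons p Q ih =>
    intro T h
    have h1 : ¬ p.1.isSuffixOf T = true := by
      rw [List.isSuffixOf_iff_suffix]; exact h p (by simp)
    simp only [List.foldl_cons, pvTokRepl, if_neg h1]
    exact ih T (fun q hq => h q (by simp [hq]))

theorem pvFold_eq_first :
    ∀ (Q : List (List Char × List Char)), Q.Pairwise pvR →
      ∀ T : List Char,
        Q.foldl (fun T kv => pvTokRepl kv.1 kv.2 T) T = pvFirstRepl Q T := by
  intro Q
  induction Q with
  | nil => intro _ T; rfl
  | cons p Q ih =>
    intro hpw T
    have hpw' := (List.pairwise_cons.mp hpw).2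
    have hR := (List.pairwise_cons.mp hpw).1
    rw [pvFirstRepl]
    by_cases hs : p.1.isSuffixOf T = true
    · have hsuf : p.1 <:+ T := List.isSuffixOf_iff_suffix.mp hs
      have hend : PySem.Chars.endswith T p.1 = true := by
        rw [PySem.Chars.endswith]; exact hs
      rw [if_pos hend]
      have hlen : p.1.length ≤ T.length := hsuf.length_le
      have hslice : PySem.List.slice T none (some ((T.length : Int) - (p.1.length : Int)))
          = T.take (T.length - p.1.length) := by
        rw [PySem.List.slice_to T (b := (T.length : Int) - (p.1.length : Int)) (by omega)]
        congr 1
        omega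
      simp only [List.foldl_cons, pvTokRepl, if_pos hs]
      rw [hslice]
      apply pvFold_noop
      intro q hq hq'
      rcases pvSuffix_append_cases hq' with h | h
      · exact (hR q hq).2.2.1 h
      · exact (hR q hq).2.2.2 h
    · have hend : ¬ PySem.Chars.endswith T p.1 = true := by
        rw [PySem.Chars.endswith]; exact hs
      rw [if_neg hend]
      simp only [List.foldl_cons, pvTokRepl, if_neg hs]
      exact ih hpw' T

theorem pvTokB_ne_nil : ∀ (s cur : List Char), pvTokB s cur ≠ [] := by
  intro s
  induction s with
  | nil => intro cur; simp [pvTokB]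
  | cons c rest ih =>
    intro cur
    rw [pvTokB]
    by_cases h : c = ':' <;> simp [h, ih]

theorem pvTokOK_cons {T : List Char} {Ts : List (List Char)} (hT : pvProper T)
    (hTs : pvTokOK Ts) (hne : Ts ≠ []) : pvTokOK (T :: Ts) := by
  match Ts, hne with
  | T' :: Ts', _ => exact ⟨hT, hTs⟩

theorem pvTokB_spec : ∀ (s cur : List Char), ':' ∉ cur →
    pvTokOK (pvTokB s cur) ∧ (pvTokB s cur).flatten = cur ++ s := by
  intro s
  induction s with
  | nil =>
    intro cur hcur
    refine ⟨hcur, by simp [pvTokB]⟩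
  | cons c rest ih =>
    intro cur hcur
    rw [pvTokB]
    by_cases h : c = ':'
    · subst h
      rw [if_pos rfl]
      obtain ⟨hok, hfl⟩ := ih [] (by simp)
      constructor
      · apply pvTokOK_cons _ hok (pvTokB_ne_nil rest [])
        constructor
        · rw [List.dropLast_append_of_ne_nil (by simp)]
          simpa using hcur
        · rw [List.getLast?_append_of_ne_nil _ (by simp)]
          rfl
      · rw [List.flatten_cons, hfl]
        simp
    · rw [if_neg h]
      obtain ⟨hok, hfl⟩ := ih (cur ++ [c]) (by
        intro hm
        rcases List.mem_append.mp hm with hm | hm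
        · exact hcur hm
        · simp at hm; exact h hm.symm)
      refine ⟨hok, ?_⟩
      rw [hfl]
      simp

theorem pvFoldA_toList : ∀ (pairs : List (String × String)) (s : String),
    (pairs.foldl (fun result kv => PySem.Str.replace result kv.1 kv.2) s).toList
      = (pairs.map (fun kv => (kv.1.toList, kv.2.toList))).foldl
          (fun r kv => PySem.Chars.replace r kv.1 kv.2) s.toList := by
  intro pairs
  induction pairs with
  | nil => intro s; rfl
  | cons p pairs ih =>
    intro s
    simp only [List.foldl_cons, List.map_cons]
    rw [ih]
    congr 1
    rw [PySem.Str.replace]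
    simp

def pvGoodB (x : List Char) : Bool :=
  !(x.dropLast.contains ':') && (x.getLast? == some ':') && decide (2 ≤ x.length)

theorem pvGoodB_good {x : List Char} (h : pvGoodB x = true) : pvGood x := by
  rw [pvGoodB] at h
  simp at h
  unfold pvGood
  tauto

theorem pvGood_all : ∀ p ∈ pvTranslationsB, pvGood p.1 ∧ pvGood p.2 := by
  intro p hp
  refine ⟨pvGoodB_good ?_, pvGoodB_good ?_⟩ <;> fin_cases hp <;> decide

def pvRB (p q : List Char × List Char) : Bool :=
  !(p.1.isSuffixOf q.1) && !(q.1.isSuffixOf p.1) && !(q.1.isSuffixOf p.2) && !(p.2.isSuffixOf q.1)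

theorem pvRB_R {p q : List Char × List Char} (h : pvRB p q = true) : pvR p q := by
  rw [pvRB] at h
  simp only [Bool.and_eq_true, Bool.not_eq_true'] at h
  unfold pvR
  refine ⟨?_, ?_, ?_, ?_⟩ <;> intro hc <;> rw [← List.isSuffixOf_iff_suffix] at hc <;> simp_all

theorem pvPairwise_all : pvTranslationsB.Pairwise pvR :=
  List.Pairwise.imp (fun h => pvRB_R h)
    (by decide : pvTranslationsB.Pairwise (fun p q => pvRB p q = true))

theorem pvMapAB :
    pvTranslationsA.map (fun kv => (kv.1.toList, kv.2.toList)) = pvTranslationsB := by rfl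

theorem pv_main (q : String) : translate_shodan_query q = translate_shodan_query_alt q := by
  have h1 : (translate_shodan_query q).toList
      = pvTranslationsB.foldl (fun r kv => PySem.Chars.replace r kv.1 kv.2) q.toList := by
    rw [translate_shodan_query, pvFoldA_toList, pvMapAB]
  have h2 : pvTranslationsB.foldl (fun r kv => PySem.Chars.replace r kv.1 kv.2) q.toList
      = ((pvTokB q.toList []).map (pvFirstRepl pvTranslationsB)).flatten := by
    obtain ⟨hok, hfl⟩ := pvTokB_spec q.toList [] (by simp)
    have e0 : (pvTokB q.toList []).flatten = q.toList := by rw [hfl]; simp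
    conv_lhs => rw [← e0]
    rw [pvChain_flatten pvTranslationsB pvGood_all _ hok]
    exact congrArg List.flatten
      (List.map_congr_left (fun T _ => pvFold_eq_first pvTranslationsB pvPairwise_all T))
  rw [translate_shodan_query_alt, ← h2, ← h1, String.ofList_toList]

-- ===== VERDICT (by name: the statement is the Claim_ definition above) =====
theorem translate_shodan_query_spec : Claim_equal_translate_shodan_query := by
  intro shodan_query _
  unfold Spec_translate_shodan_query
  exact pv_main shodan_query
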